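-- pv_equiv track=rewrite | github.com/vosslab/webwork-pgml-libretexts-adapt-texbook | tools/extract_textbook_yake_keywords.py | has_technical_signal
-- ===== SOURCE A (Python) =====
-- def has_technical_signal(term: str) -> bool:
-- 	"""Detect acronym/code-like single-word terms worth keeping."""
-- 	if "_" in term or "-" in term:
-- 		return True
-- 	if any(char.isdigit() for char in term):
-- 		return True
-- 	if any(char.isupper() for char in term[1:]) and not term.isupper():
-- 		return True
-- 	return False
-- ===== SOURCE B (Python) =====
-- def has_technical_signal(term: str) -> bool:
-- 	"""Detect acronym/code-like single-word terms worth keeping (single pass)."""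
-- 	has_sep = has_digit = has_upper_after_first = has_cased = has_lower = False
-- 	for i, ch in enumerate(term):
-- 		if ch == "_" or ch == "-":
-- 			has_sep = True
-- 		if ch.isdigit():
-- 			has_digit = True
-- 		if i > 0 and ch.isupper():
-- 			has_upper_after_first = True
-- 		if ch.isupper() or ch.islower():
-- 			has_cased = True
-- 		if ch.islower():
-- 			has_lower = True
-- 	return has_sep or has_digit or (has_upper_after_first and not (has_cased and not has_lower))
-- ===== Notes on version B (the rewrite author's own statement) =====
-- stated objective: alternative
-- what changed: Replaces A's four separate scans (two substring tests, a digit scan, an upper scan of term[1:] plus term.isupper()) by a single pass over the characters that accumulates five boolean flags and combines them at the end.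
import Mathlib
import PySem

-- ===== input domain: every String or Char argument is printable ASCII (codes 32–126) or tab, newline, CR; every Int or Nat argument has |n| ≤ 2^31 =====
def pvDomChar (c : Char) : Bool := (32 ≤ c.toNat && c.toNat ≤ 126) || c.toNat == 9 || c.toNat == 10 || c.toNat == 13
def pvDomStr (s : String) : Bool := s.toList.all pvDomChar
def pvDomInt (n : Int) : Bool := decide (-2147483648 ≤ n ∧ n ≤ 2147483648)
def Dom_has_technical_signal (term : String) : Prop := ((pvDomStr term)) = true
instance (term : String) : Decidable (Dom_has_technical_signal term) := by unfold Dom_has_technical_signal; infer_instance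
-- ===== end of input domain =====

-- B replaces A's four separate scans of term by one pass accumulating five boolean flags (alternative decomposition, same cost).


-- ===== PORT A =====
-- term.isupper(): at least one cased char and no lowercase cased char; exact on the ASCII domain,
-- where the cased characters are exactly a-z and A-Z.
def pyStrIsupper (cs : List Char) : Bool :=
  cs.any PySem.Chars.isupper && !(cs.any PySem.Chars.islower)

def has_technical_signal (term : String) : Bool :=
  if PySem.Str.isIn "_" term || PySem.Str.isIn "-" term then true
  else if term.toList.any PySem.Chars.isdigit then true
  else if (PySem.List.slice term.toList (some 1) none).any PySem.Chars.isupper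
          && !(pyStrIsupper term.toList) then true
  else false

-- ===== PORT B =====
-- state = (has_sep, has_digit, has_upper_after_first, has_cased, has_lower)
def altStep (st : Bool × Bool × Bool × Bool × Bool) (p : Int × Char) :
    Bool × Bool × Bool × Bool × Bool :=
  ( st.1 || (p.2 == '_' || p.2 == '-'),
    st.2.1 || PySem.Chars.isdigit p.2,
    st.2.2.1 || (decide (0 < p.1) && PySem.Chars.isupper p.2),
    st.2.2.2.1 || (PySem.Chars.isupper p.2 || PySem.Chars.islower p.2),
    st.2.2.2.2 || PySem.Chars.islower p.2 )

def has_technical_signal_alt (term : String) : Bool :=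
  let st := (PySem.List.enumerate term.toList 0).foldl altStep
    (false, false, false, false, false)
  st.1 || st.2.1 || (st.2.2.1 && !(st.2.2.2.1 && !st.2.2.2.2))

-- ===== PRECONDITION & SPEC =====
def Spec_has_technical_signal (term : String) (out : Bool) : Prop := out = has_technical_signal_alt term
instance (term : String) (out : Bool) : Decidable (Spec_has_technical_signal term out) := by unfold Spec_has_technical_signal; infer_instance

-- ===== CLAIM (what is proved, stated in full; the proofs are below) =====
def Claim_equal_has_technical_signal : Prop := ∀ (term : String), Dom_has_technical_signal term → Spec_has_technical_signal term (has_technical_signal term)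

-- ===== LEMMAS AND PROOFS =====

-- The B fold with a positive start index yields componentwise disjunctions of 'any' scans.
lemma foldl_altStep_pos (cs : List Char) (s : Int) (st : Bool × Bool × Bool × Bool × Bool)
    (hs : 1 ≤ s) :
    (PySem.List.enumerate cs s).foldl altStep st =
      ( st.1 || cs.any (fun c => c == '_' || c == '-'),
        st.2.1 || cs.any PySem.Chars.isdigit,
        st.2.2.1 || cs.any PySem.Chars.isupper,
        st.2.2.2.1 || cs.any (fun c => PySem.Chars.isupper c || PySem.Chars.islower c),
        st.2.2.2.2 || cs.any PySem.Chars.islower ) := by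
  induction cs generalizing s st with
  | nil => simp [PySem.List.enumerate_nil]
  | cons c cs ih =>
      rw [PySem.List.enumerate_cons, List.foldl_cons, ih (s + 1) _ (by omega)]
      simp [altStep, show decide (0 < s) = true from by simp; omega, Bool.or_assoc]

-- singleton substring containment is character membership
lemma isIn_singleton (c : Char) (l : List Char) :
    PySem.Chars.isIn [c] l = l.any (fun x => x == c) := by
  have h := PySem.Chars.isIn_iff_infix (sub := [c]) (s := l)
  have h' := PySem.Chars.isIn_eq_false_iff (sub := [c]) (s := l)
  rw [List.singleton_infix_iff] at h h'
  cases hb : l.any (fun x => x == c) with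
  | false =>
      simp only [List.any_eq_false, beq_iff_eq] at hb
      exact h'.mpr (fun hc => hb c hc rfl)
  | true =>
      simp only [List.any_eq_true, beq_iff_eq] at hb
      obtain ⟨x, hx, rfl⟩ := hb
      exact h.mpr hx

-- distribute 'any' over a pointwise disjunction (used to atomize the final Boolean identity)
-- an if-chain step 'if p: return True' is a disjunction
lemma ifb (p q : Bool) : (if p = true then true else q) = (p || q) := by
  cases p <;> simp

lemma any_or_split (cs : List Char) (p q : Char → Bool) :
    (cs.any fun x => p x || q x) = (cs.any p || cs.any q) := by
  induction cs with
  | nil => simp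
  | cons a l ih => simp [ih]; cases p a <;> cases q a <;> simp

-- ===== VERDICT (by name: the statement is the Claim_ definition above) =====
theorem has_technical_signal_spec : Claim_equal_has_technical_signal := by
  intro term hdom
  unfold Spec_has_technical_signal has_technical_signal has_technical_signal_alt pyStrIsupper
  have e1 : PySem.Str.isIn "_" term = term.toList.any (fun x => x == '_') := by
    rw [show PySem.Str.isIn "_" term = PySem.Chars.isIn ['_'] term.toList from rfl,
      isIn_singleton]
  have e2 : PySem.Str.isIn "-" term = term.toList.any (fun x => x == '-') := by
    rw [show PySem.Str.isIn "-" term = PySem.Chars.isIn ['-'] term.toList from rfl,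
      isIn_singleton]
  rw [e1, e2, PySem.List.slice_from_one]
  rcases hcs : term.toList with _ | ⟨c, cs⟩
  · simp [PySem.List.enumerate_nil]
  · rw [PySem.List.enumerate_cons, List.foldl_cons]
    have hstep : altStep (false, false, false, false, false) (0, c) =
        ( c == '_' || c == '-', PySem.Chars.isdigit c, false,
          PySem.Chars.isupper c || PySem.Chars.islower c, PySem.Chars.islower c ) := by
      simp [altStep]
    rw [hstep, foldl_altStep_pos cs (0 + 1) _ (by omega),
      any_or_split cs (fun x => x == '_') (fun x => x == '-'),
      any_or_split cs PySem.Chars.isupper PySem.Chars.islower]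
    simp only [ifb]
    simp only [List.any_cons, List.tail_cons]
    generalize (c == '_') = b1
    generalize (c == '-') = b2
    generalize PySem.Chars.isdigit c = b3
    generalize PySem.Chars.isupper c = b4
    generalize PySem.Chars.islower c = b5
    generalize cs.any (fun x => x == '_') = b6
    generalize cs.any (fun x => x == '-') = b7
    generalize cs.any PySem.Chars.isdigit = b8
    generalize cs.any PySem.Chars.isupper = b9
    generalize cs.any PySem.Chars.islower = b10
    revert b1 b2 b3 b4 b5 b6 b7 b8 b9 b10
    decide
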